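-- pv_equiv track=rewrite | github.com/saranjith-tm/insurance_agent_poc | apps/sales_agent/service.py | get_queue_stats
-- ===== SOURCE A (Python) =====
-- def get_queue_stats(cases):
--     """Compute summary stats for queue view."""
--     total = len(cases)
--     pending = sum(1 for c in cases if c["status"] == "Pending")
--     in_progress = sum(1 for c in cases if c["status"] == "In Progress")
--     completed = sum(1 for c in cases if c["status"] == "Completed")
--     referred = sum(1 for c in cases if c["status"] == "Referred to Risk")
--     return {
--         "total": total,
--         "pending": pending,
--         "in_progress": in_progress,
--         "completed": completed,
--         "referred": referred,
--     }
-- ===== SOURCE B (Python) =====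
-- def get_queue_stats(cases):
--     """Compute summary stats for queue view."""
--     counts = {}
--     for c in cases:
--         s = c["status"]
--         counts[s] = counts.get(s, 0) + 1
--     return {
--         "total": len(cases),
--         "pending": counts.get("Pending", 0),
--         "in_progress": counts.get("In Progress", 0),
--         "completed": counts.get("Completed", 0),
--         "referred": counts.get("Referred to Risk", 0),
--     }
-- ===== Notes on version B (the rewrite author's own statement) =====
-- stated objective: idiomatic
-- what changed: Replaces four independent generator-expression scans of the cases list by a single pass that accumulates a status-count dict, then reads the four fields from it with .get(status, 0).
import Mathlib
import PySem

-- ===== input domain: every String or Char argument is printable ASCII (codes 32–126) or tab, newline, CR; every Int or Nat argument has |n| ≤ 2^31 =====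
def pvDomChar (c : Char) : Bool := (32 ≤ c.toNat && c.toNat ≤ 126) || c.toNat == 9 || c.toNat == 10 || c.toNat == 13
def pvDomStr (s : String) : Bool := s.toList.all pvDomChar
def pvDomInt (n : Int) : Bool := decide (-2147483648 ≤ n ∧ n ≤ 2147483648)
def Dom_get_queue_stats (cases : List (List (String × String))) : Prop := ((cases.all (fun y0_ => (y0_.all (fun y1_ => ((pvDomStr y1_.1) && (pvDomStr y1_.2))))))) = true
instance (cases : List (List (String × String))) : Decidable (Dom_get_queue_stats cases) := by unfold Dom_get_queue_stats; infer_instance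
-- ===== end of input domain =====

-- B replaces A's four independent scans of `cases` by one counting pass over a
-- status→count dict followed by a fixed-size read-out (objective: idiomatic).

-- ===== PORT A =====
-- sum(1 for c in cases if c["status"] == s)
def pvCountStatus (cases : List (List (String × String))) (s : String) : Int :=
  cases.foldl (fun acc c => if (PySem.Dict.mk c).get? "status" == some s then acc + 1 else acc) 0

def get_queue_stats (cases : List (List (String × String))) : List (String × Int) :=
  [("total", (cases.length : Int)),
   ("pending", pvCountStatus cases "Pending"),
   ("in_progress", pvCountStatus cases "In Progress"),
   ("completed", pvCountStatus cases "Completed"),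
   ("referred", pvCountStatus cases "Referred to Risk")]

-- ===== PORT B =====
-- one pass building counts: counts[s] = counts.get(s, 0) + 1  (missing "status"
-- is excluded by Pre_, so the total form .getD "" is exact there)
def get_queue_stats_alt (cases : List (List (String × String))) : List (String × Int) :=
  let counts : PySem.Dict String Int :=
    cases.foldl (fun d c =>
      d.insert (((PySem.Dict.mk c).get? "status").getD "")
        (d.getD (((PySem.Dict.mk c).get? "status").getD "") 0 + 1)) PySem.Dict.empty
  [("total", (cases.length : Int)),
   ("pending", counts.getD "Pending" 0),
   ("in_progress", counts.getD "In Progress" 0),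
   ("completed", counts.getD "Completed" 0),
   ("referred", counts.getD "Referred to Risk" 0)]

-- ===== PRECONDITION & SPEC =====
-- Pre_ excludes exactly the inputs where some case lacks the "status" key, on
-- which Python A (and Python B) raise KeyError.
def Pre_get_queue_stats (cases : List (List (String × String))) : Prop :=
  (cases.all (fun c => (PySem.Dict.mk c).contains "status")) = true
instance (cases : List (List (String × String))) : Decidable (Pre_get_queue_stats cases) := by unfold Pre_get_queue_stats; infer_instance

def pvWitness_get_queue_stats : (List (List (String × String))) :=
  [[("status", "Pending")], [("status", "Done")], [("status", "Pending"), ("id", "7")]]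

def Spec_get_queue_stats (cases : List (List (String × String))) (out : List (String × Int)) : Prop := out = get_queue_stats_alt cases
instance (cases : List (List (String × String))) (out : List (String × Int)) : Decidable (Spec_get_queue_stats cases out) := by unfold Spec_get_queue_stats; infer_instance

-- ===== CLAIM (what is proved, stated in full; the proofs are below) =====
def Claim_equal_get_queue_stats : Prop := ∀ (cases : List (List (String × String))), Dom_get_queue_stats cases → Pre_get_queue_stats cases → Spec_get_queue_stats cases (get_queue_stats cases)

-- ===== LEMMAS AND PROOFS =====
lemma pvCountStatus_go (cases : List (List (String × String))) (s : String) (hs : s ≠ "")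
    (acc : Int) :
    cases.foldl (fun acc c => if (PySem.Dict.mk c).get? "status" == some s then acc + 1 else acc) acc
      = acc + ((cases.map (fun c => ((PySem.Dict.mk c).get? "status").getD "")).count s : Int) := by
  induction cases generalizing acc with
  | nil => simp
  | cons c cs ih =>
    simp only [List.foldl_cons, List.map_cons, List.count_cons, ih]
    rcases h : (PySem.Dict.mk c).get? "status" with _ | v
    · simp [Ne.symm hs]
    · by_cases hv : v = s
      · simp [hv]; ring
      · simp [hv, beq_iff_eq]

lemma pvFoldInsert_getD (l : List (List (String × String))) (s : String)
    (d : PySem.Dict String Int) :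
    (l.foldl (fun d c =>
        d.insert (((PySem.Dict.mk c).get? "status").getD "")
          (d.getD (((PySem.Dict.mk c).get? "status").getD "") 0 + 1)) d).getD s 0
      = d.getD s 0 + ((l.map (fun c => ((PySem.Dict.mk c).get? "status").getD "")).count s : Int) := by
  induction l generalizing d with
  | nil => simp
  | cons c cs ih =>
    simp only [List.foldl_cons, List.map_cons, List.count_cons, ih]
    rw [PySem.Dict.getD_insert]
    by_cases h : s = ((PySem.Dict.mk c).get? "status").getD ""
    · simp [h]
      ring
    · simp [h, Ne.symm h]

lemma pvCountStatus_eq_getD (cases : List (List (String × String))) (s : String) (hs : s ≠ "") :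
    pvCountStatus cases s
      = (cases.foldl (fun d c =>
          d.insert (((PySem.Dict.mk c).get? "status").getD "")
            (d.getD (((PySem.Dict.mk c).get? "status").getD "") 0 + 1)) PySem.Dict.empty).getD s 0 := by
  rw [pvFoldInsert_getD, PySem.Dict.getD_empty, pvCountStatus, pvCountStatus_go _ _ hs]

-- ===== VERDICT (by name: the statement is the Claim_ definition above) =====
theorem get_queue_stats_spec : Claim_equal_get_queue_stats := by
  intro cases _ _
  unfold Spec_get_queue_stats get_queue_stats get_queue_stats_alt
  rw [pvCountStatus_eq_getD cases "Pending" (by decide),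
      pvCountStatus_eq_getD cases "In Progress" (by decide),
      pvCountStatus_eq_getD cases "Completed" (by decide),
      pvCountStatus_eq_getD cases "Referred to Risk" (by decide)]
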